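-- pv_equiv track=rewrite | github.com/vinesnts/pesquisa-investigando-conjuntos-de-dados-de-vulnerabilidades | src/metrics/results/pic.py | quantities
-- ===== SOURCE A (Python) =====
-- def quantities(values):
--   qtds = {}
--   for v in values:
--     try:
--       v = int(v//10*10)
--       if v not in qtds:
--         qtds[v] = 0
--       qtds[v] += 1
--     except:
--       pass
--   return qtds
-- ===== SOURCE B (Python) =====
-- def quantities(values):
--     buckets = [int(v // 10 * 10) for v in values]
--     srt = sorted(buckets)
--     counts = {}
--     i = 0
--     while i < len(srt):
--         j = i + 1
--         while j < len(srt) and srt[j] == srt[i]: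
--             j += 1
--         counts[srt[i]] = j - i
--         i = j
--     return {b: counts[b] for b in dict.fromkeys(buckets)}
-- ===== Notes on version B (the rewrite author's own statement) =====
-- stated objective: alternative
-- what changed: Replaces the incremental hash-dict counter loop by a sort-then-group pipeline: map values to tens buckets, sort the bucket list, count each maximal run in one scan, and emit the counts keyed by first occurrence.
import Mathlib
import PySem

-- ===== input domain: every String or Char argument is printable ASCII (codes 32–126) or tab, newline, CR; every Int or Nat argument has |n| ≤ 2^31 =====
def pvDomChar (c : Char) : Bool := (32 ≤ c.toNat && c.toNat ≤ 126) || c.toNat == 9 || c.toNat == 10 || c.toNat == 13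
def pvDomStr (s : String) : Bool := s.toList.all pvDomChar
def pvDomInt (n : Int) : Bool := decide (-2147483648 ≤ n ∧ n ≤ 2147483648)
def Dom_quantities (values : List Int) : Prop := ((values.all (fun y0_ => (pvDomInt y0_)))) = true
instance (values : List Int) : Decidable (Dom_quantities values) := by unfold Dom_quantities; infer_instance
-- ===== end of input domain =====

-- B replaces A's incremental dict-counter loop by sort-then-group: sort the bucket list, count maximal runs,
-- emit counts keyed by first occurrence. On List Int inputs A's try/except never fires, so it is dropped.

-- ===== PORT A =====
-- for v in values: v = int(v//10*10); if v not in qtds: qtds[v] = 0; qtds[v] += 1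
def quantities (values : List Int) : List (Int × Int) :=
  (values.foldl (fun qtds v =>
      let b := PySem.Int.floordiv v 10 * 10
      let qtds' := if qtds.contains b then qtds else qtds.insert b 0
      qtds'.insert b (qtds'.getD b 0 + 1))
    PySem.Dict.empty).items

-- ===== PORT B =====
-- the while loops: from position i take the maximal run of elements equal to srt[i],
-- record its length under srt[i], resume after the run (structural recursion on the remaining suffix)
def quantitiesRuns (srt : List Int) (counts : PySem.Dict Int Int) : PySem.Dict Int Int :=
  match srt with
  | [] => counts
  | x :: rest =>
      let run := rest.takeWhile (fun y => y == x)
      let tail := rest.dropWhile (fun y => y == x)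
      quantitiesRuns tail (counts.insert x ((run.length : Int) + 1))
termination_by srt.length
decreasing_by
  simp only [List.length_cons]
  exact Nat.lt_succ_of_le (List.length_dropWhile_le _ _)

-- buckets = [int(v // 10 * 10) for v in values]; srt = sorted(buckets); run-length scan into counts;
-- {b: counts[b] for b in dict.fromkeys(buckets)}
def quantities_alt (values : List Int) : List (Int × Int) :=
  let buckets := values.map (fun v => PySem.Int.floordiv v 10 * 10)
  let srt := PySem.List.sorted buckets (fun x => x) false
  let counts := quantitiesRuns srt PySem.Dict.empty
  (PySem.List.dedup buckets).map (fun b => (b, counts.getD b 0))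

-- ===== PRECONDITION & SPEC =====
def Spec_quantities (values : List Int) (out : List (Int × Int)) : Prop := out = quantities_alt values
instance (values : List Int) (out : List (Int × Int)) : Decidable (Spec_quantities values out) := by unfold Spec_quantities; infer_instance

-- ===== CLAIM (what is proved, stated in full; the proofs are below) =====
def Claim_equal_quantities : Prop := ∀ (values : List Int), Dom_quantities values → Spec_quantities values (quantities values)

-- ===== LEMMAS AND PROOFS =====

-- A's loop body at bucket b equals the plain counter step insert b (getD b 0 + 1)
theorem quantities_step (qtds : PySem.Dict Int Int) (b : Int) :
    (let qtds' := if qtds.contains b then qtds else qtds.insert b 0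
     qtds'.insert b (qtds'.getD b 0 + 1)) = qtds.insert b (qtds.getD b 0 + 1) := by
  by_cases h : qtds.contains b
  · simp [h]
  · simp only [Bool.not_eq_true] at h
    simp [h, PySem.Dict.getD_insert_self, PySem.Dict.insert_insert_self,
      PySem.Dict.getD_of_not_contains qtds 0 h]

-- in a ≤-sorted list, an element never reappears after its maximal run is dropped
theorem not_mem_dropWhile_eq (x : Int) (l : List Int)
    (hp : l.Pairwise (fun a b => a ≤ b)) (hx : ∀ y ∈ l, x ≤ y) :
    x ∉ l.dropWhile (fun y => y == x) := by
  induction l with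
  | nil => simp
  | cons h t ih =>
    by_cases hh : (h == x) = true
    · simp only [List.dropWhile_cons, hh]
      exact ih hp.tail (fun y hy => hx y (List.mem_cons_of_mem _ hy))
    · simp only [List.dropWhile_cons, hh]
      intro hmem
      rcases List.mem_cons.mp hmem with rfl | hmem'
      · exact hh (by simp)
      · have hxh : x ≤ h := hx h (List.mem_cons_self)
        have hhy : h ≤ x := (List.pairwise_cons.mp hp).1 x hmem'
        exact hh (by simp [le_antisymm hhy hxh])

-- the run-length scan over a ≤-sorted list records exact counts
theorem quantitiesRuns_getD (srt : List Int) (counts : PySem.Dict Int Int) (b : Int)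
    (hp : srt.Pairwise (fun a b => a ≤ b)) :
    (quantitiesRuns srt counts).getD b 0 =
      if b ∈ srt then (srt.count b : Int) else counts.getD b 0 := by
  induction srt, counts using quantitiesRuns.induct with
  | case1 counts => simp [quantitiesRuns]
  | case2 counts x rest run tail ih =>
    have hsplit : rest = run ++ tail := (List.takeWhile_append_dropWhile (p := fun y => y == x) (l := rest)).symm
    have htail_pw : tail.Pairwise (fun a b => a ≤ b) :=
      hp.tail.sublist (List.dropWhile_sublist _)
    have hx_le : ∀ y ∈ rest, x ≤ y := (List.pairwise_cons.mp hp).1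
    have hx_notin : x ∉ tail :=
      not_mem_dropWhile_eq x rest hp.tail hx_le
    rw [quantitiesRuns]
    rw [ih htail_pw]
    by_cases hbx : b = x
    · subst hbx
      have hcount_run : run.count b = run.length :=
        List.count_eq_length.mpr (fun y hy => by
          have h := List.mem_takeWhile_imp (p := fun y => y == b) (l := rest) hy
          exact (beq_iff_eq.mp h).symm)
      have hcount_tail : tail.count b = 0 := List.count_eq_zero.mpr hx_notin
      have hc : rest.count b = run.length := by
        rw [hsplit, List.count_append, hcount_run, hcount_tail, Nat.add_zero]
      rw [if_neg hx_notin, if_pos (List.mem_cons_self), PySem.Dict.getD_insert_self,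
        List.count_cons_self, hc]
      push_cast
      ring
    · have hgd : (counts.insert x ((run.length : Int) + 1)).getD b 0 = counts.getD b 0 :=
        PySem.Dict.getD_insert_of_ne counts ((run.length : Int) + 1) 0 hbx
      have hbrun : b ∉ run := fun hy => by
        have := List.mem_takeWhile_imp hy; simp at this; exact hbx this
      by_cases hbt : b ∈ tail
      · have hmem : b ∈ x :: rest := by
          rw [hsplit]; exact List.mem_cons_of_mem _ (List.mem_append_right _ hbt)
        have hc2 : (x :: rest).count b = tail.count b := by
          have h1 : rest.count b = tail.count b := by
            rw [hsplit, List.count_append, List.count_eq_zero.mpr hbrun, Nat.zero_add]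
          simp [Ne.symm hbx, h1]
        rw [if_pos hbt, if_pos hmem, hc2]
      · have hnm : b ∉ x :: rest := by
          rw [hsplit]
          simp only [List.mem_cons, List.mem_append]
          push Not
          exact ⟨hbx, hbrun, hbt⟩
        rw [if_neg hbt, if_neg hnm, hgd]

-- ===== VERDICT (by name: the statement is the Claim_ definition above) =====
theorem quantities_spec : Claim_equal_quantities := by
  intro values _
  unfold Spec_quantities quantities quantities_alt
  simp only [quantities_step]
  have key : values.foldl
      (fun (qtds : PySem.Dict Int Int) (v : Int) =>
        qtds.insert (PySem.Int.floordiv v 10 * 10)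
          (qtds.getD (PySem.Int.floordiv v 10 * 10) 0 + 1))
      PySem.Dict.empty
    = (values.map (fun v => PySem.Int.floordiv v 10 * 10)).foldl
        (fun d x => d.insert x (d.getD x 0 + 1)) PySem.Dict.empty :=
    (List.foldl_map (f := fun v => PySem.Int.floordiv v 10 * 10)
      (g := fun (d : PySem.Dict Int Int) (x : Int) => d.insert x (d.getD x 0 + 1))
      (l := values) (init := PySem.Dict.empty)).symm
  rw [key, PySem.Dict.foldl_insert_getD_add_one_eq_counter,
    PySem.Dict.items_counter, ← PySem.List.dedup_eq_ofList]
  apply List.map_congr_left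
  intro b hb
  have hbmem : b ∈ values.map (fun v => PySem.Int.floordiv v 10 * 10) :=
    (PySem.List.mem_dedup _ _).mp hb
  have hsrtmem : b ∈ PySem.List.sorted (values.map (fun v => PySem.Int.floordiv v 10 * 10)) (fun x => x) false :=
    (PySem.List.mem_sorted _ _ _ _).mpr hbmem
  have hpw : (PySem.List.sorted (values.map (fun v => PySem.Int.floordiv v 10 * 10)) (fun x => x) false).Pairwise (fun a b => a ≤ b) :=
    PySem.List.sorted_pairwise _ _
  rw [quantitiesRuns_getD _ _ _ hpw, if_pos hsrtmem,
    ((PySem.List.sorted_perm _ _ _).count_eq b)]
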